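-- pv_equiv track=rewrite | github.com/cleverer123/Algorithm | 递归_回溯_分治/offer_9_JumpFloor.py | jumpFloorII
-- ===== SOURCE A (Python) =====
-- def jumpFloorII(number):
--     # write code here
--     if number <= 2:
--         return number
--
--     f = [0] * (number + 1)
--     f[0] = 1
--     f[1] = 1
--     for i in range(2, number+1):
--         f[i] = sum(f[:i])
--
--     return f[-1]
-- ===== SOURCE B (Python) =====
-- def jumpFloorII(number):
--     # closed form: f[i] = 2^(i-1), so the answer is 2^(number-1)
--     if number <= 2:
--         return number
--     return 2 ** (number - 1)
-- ===== Notes on version B (the rewrite author's own statement) =====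
-- stated objective: faster
-- what changed: Replaced the O(n^2) DP table with repeated prefix sums by the closed form 2^(number-1) (f[i] doubles each step).
import Mathlib
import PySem

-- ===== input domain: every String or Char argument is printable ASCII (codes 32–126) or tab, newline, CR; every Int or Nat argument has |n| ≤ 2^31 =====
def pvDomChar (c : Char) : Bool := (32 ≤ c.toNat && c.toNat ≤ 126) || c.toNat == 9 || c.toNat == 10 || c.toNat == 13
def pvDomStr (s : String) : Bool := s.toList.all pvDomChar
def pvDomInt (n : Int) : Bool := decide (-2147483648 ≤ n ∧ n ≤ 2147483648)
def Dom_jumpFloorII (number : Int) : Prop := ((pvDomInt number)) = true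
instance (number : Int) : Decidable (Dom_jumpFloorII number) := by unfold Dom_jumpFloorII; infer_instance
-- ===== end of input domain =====

-- B replaces A's quadratic prefix-sum DP table by the closed form 2^(number-1): faster (asymptotic).


-- ===== PORT A =====
-- the loop body: f[i] = sum(f[:i])
def jfStep (f : List Int) (i : Int) : List Int :=
  f.set i.toNat (PySem.List.slice f none (some i)).sum

def jumpFloorII (number : Int) : Int :=
  if number ≤ 2 then number
  else
    let f := List.replicate (number + 1).toNat (0 : Int)   -- [0] * (number + 1)
    let f := f.set 0 1                                      -- f[0] = 1
    let f := f.set 1 1                                      -- f[1] = 1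
    let f := (PySem.List.pyRange 2 (number + 1) 1).foldl jfStep f
    -- f[-1]; on this branch f is nonempty, so the IndexError case never occurs and .getD 0 is exact
    (PySem.List.pyGet? f (-1)).getD 0

-- ===== PORT B =====
def jumpFloorII_alt (number : Int) : Int :=
  if number ≤ 2 then number
  else 2 ^ (number - 1).toNat

-- ===== PRECONDITION & SPEC =====
def Spec_jumpFloorII (number : Int) (out : Int) : Prop := out = jumpFloorII_alt number
instance (number : Int) (out : Int) : Decidable (Spec_jumpFloorII number out) := by unfold Spec_jumpFloorII; infer_instance

-- ===== CLAIM (what is proved, stated in full; the proofs are below) =====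
def Claim_equal_jumpFloorII : Prop := ∀ (number : Int), Dom_jumpFloorII number → Spec_jumpFloorII number (jumpFloorII number)

-- ===== LEMMAS AND PROOFS =====

-- the table prefix after the loop has processed indices 2..j
def pref (j : Nat) : List Int := 1 :: (List.range j).map (fun k => (2:Int)^k)

lemma pref_succ (j : Nat) : pref (j+1) = pref j ++ [(2:Int)^j] := by
  simp [pref, List.range_succ]

lemma pref_sum (j : Nat) : (pref j).sum = 2 ^ j := by
  induction j with
  | zero => simp [pref]
  | succ j ih =>
      rw [pref_succ]
      simp [ih]
      ring

lemma pref_length (j : Nat) : (pref j).length = j + 1 := by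
  simp [pref]

lemma step_prefix (p z : List Int) :
    jfStep (p ++ 0 :: z) ((p.length : Nat) : Int) = p ++ p.sum :: z := by
  unfold jfStep
  rw [PySem.List.slice_to_natCast]
  simp

lemma loop_eval (n j : Nat) (h2 : 2 ≤ j) (hj : j ≤ n) :
    (PySem.List.pyRange 2 ((j : Int) + 1) 1).foldl jfStep (pref 1 ++ List.replicate (n - 1) 0)
      = pref j ++ List.replicate (n - j) 0 := by
  induction j with
  | zero => omega
  | succ j ih =>
      rcases Nat.lt_or_ge j 2 with hlt | hge
      · -- base case j + 1 = 2
        have hj2 : j = 1 := by omega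
        subst hj2
        have hrep : List.replicate (n - 1) (0:Int) = 0 :: List.replicate (n - 2) 0 := by
          have : n - 1 = (n - 2) + 1 := by omega
          rw [this, List.replicate_succ]
        rw [hrep]
        have h3 : (((1+1:Nat) : Int) + 1) = 3 := by norm_num
        rw [h3]
        have hr : PySem.List.pyRange 2 3 1 = [(2:Int)] := by decide
        rw [hr]
        have h2' : ((2:Int)) = ((pref 1).length : Int) := by simp [pref_length]
        simp only [List.foldl_cons, List.foldl_nil]
        rw [h2', step_prefix]
        rw [pref_succ]
        simp [pref, List.range_succ]
      · -- inductive step: j ≥ 2, j + 1 ≤ n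
        have hjn : j ≤ n := by omega
        have hsplit : PySem.List.pyRange 2 (((j+1 : Nat) : Int) + 1) 1
            = PySem.List.pyRange 2 ((j : Int) + 1) 1 ++ [(j : Int) + 1] := by
          push_cast
          rw [PySem.List.pyRange_one_succ_right (by exact_mod_cast by omega)]
        rw [hsplit, List.foldl_append, ih hge hjn]
        simp only [List.foldl_cons, List.foldl_nil]
        have hrep : List.replicate (n - j) (0:Int) = 0 :: List.replicate (n - (j+1)) 0 := by
          have : n - j = (n - (j+1)) + 1 := by omega
          rw [this, List.replicate_succ]
        rw [hrep]
        have hidx : ((j : Int) + 1) = (((pref j).length : Nat) : Int) := by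
          simp [pref_length]
        rw [hidx, step_prefix, pref_sum, pref_succ]
        simp

lemma pref_last (j : Nat) (h : 1 ≤ j) :
    PySem.List.pyGet? (pref j) (-1) = some ((2:Int) ^ (j - 1)) := by
  obtain ⟨k, rfl⟩ : ∃ k, j = k + 1 := ⟨j - 1, by omega⟩
  rw [pref_succ]
  simp [PySem.List.pyGet?_neg_one_append_singleton]

-- ===== VERDICT (by name: the statement is the Claim_ definition above) =====
theorem jumpFloorII_spec : Claim_equal_jumpFloorII := by
  intro number _
  unfold Spec_jumpFloorII jumpFloorII jumpFloorII_alt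
  split
  · rfl
  · rename_i hgt
    push Not at hgt
    set n : Nat := number.toNat with hn
    have hnum : number = (n : Int) := by omega
    have hn3 : 3 ≤ n := by omega
    have hinit : (((List.replicate (number + 1).toNat (0:Int)).set 0 1).set 1 1)
        = pref 1 ++ List.replicate (n - 1) 0 := by
      have : (number + 1).toNat = (n - 1) + 2 := by omega
      rw [this]
      simp [List.replicate_succ, pref]
    simp only [hinit]
    have hb : number + 1 = ((n : Int)) + 1 := by omega
    rw [hb, loop_eval n n (by omega) (le_refl n)]
    simp only [Nat.sub_self, List.replicate_zero, List.append_nil]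
    rw [pref_last n (by omega)]
    have : (number - 1).toNat = n - 1 := by omega
    rw [this]
    rfl
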